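-- pv_equiv track=rewrite | github.com/brianchaplow/HomeLab-SOC-v3 | honeypot/scripts/honeypot-export-powerbi.py | find_date_range
-- ===== SOURCE A (Python) =====
-- def find_date_range(docs):
--     """Find min/max @timestamp across docs."""
--     timestamps = []
--     for doc in docs:
--         ts = doc.get("@timestamp") or doc.get("timestamp")
--         if ts:
--             timestamps.append(str(ts))
--     if not timestamps:
--         return None, None
--     timestamps.sort()
--     return timestamps[0], timestamps[-1]
-- ===== SOURCE B (Python) =====
-- def find_date_range(docs):
--     """Find min/max @timestamp across docs in a single streaming pass (no list, no sort)."""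
--     lo = hi = None
--     for doc in docs:
--         ts = doc.get("@timestamp") or doc.get("timestamp")
--         if not ts:
--             continue
--         s = str(ts)
--         if lo is None:
--             lo = hi = s
--         else:
--             if s < lo:
--                 lo = s
--             if s > hi:
--                 hi = s
--     return lo, hi
-- ===== Notes on version B (the rewrite author's own statement) =====
-- stated objective: alternative
-- what changed: B replaces A's collect-into-a-list-then-sort-and-index with a single streaming pass that tracks the running lexicographic min and max in two variables, never materialising or sorting a list; it trades the sort for constant extra memory at the same measured cost.
import Mathlib
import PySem

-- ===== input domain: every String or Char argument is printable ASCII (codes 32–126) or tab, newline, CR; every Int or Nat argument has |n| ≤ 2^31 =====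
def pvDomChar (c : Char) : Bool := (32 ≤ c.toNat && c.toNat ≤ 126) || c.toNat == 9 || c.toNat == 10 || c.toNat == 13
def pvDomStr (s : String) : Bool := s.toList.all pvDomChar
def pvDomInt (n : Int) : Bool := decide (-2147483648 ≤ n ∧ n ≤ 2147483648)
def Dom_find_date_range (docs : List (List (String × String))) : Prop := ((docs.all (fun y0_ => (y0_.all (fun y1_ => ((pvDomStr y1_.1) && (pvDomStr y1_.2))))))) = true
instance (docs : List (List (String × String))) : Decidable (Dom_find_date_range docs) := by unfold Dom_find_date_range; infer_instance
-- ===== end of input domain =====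

-- B makes one streaming pass tracking running min/max; A builds a list and sorts it.
-- ===== PORT A =====
-- shared helper: the line `ts = doc.get("@timestamp") or doc.get("timestamp"); if ts:` of both Pythons
-- (truthiness: None and "" are falsy); returns the kept timestamp, if any. str(ts) is the identity here.
def pvGetTs (doc : List (String × String)) : Option String :=
  let ts : Option String :=
    match (PySem.Dict.mk doc).get? "@timestamp" with
    | some s => if s = "" then (PySem.Dict.mk doc).get? "timestamp" else some s
    | none => (PySem.Dict.mk doc).get? "timestamp"
  match ts with
  | some s => if s = "" then none else some s
  | none => none

def find_date_range (docs : List (List (String × String))) : Option String × Option String :=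
  let timestamps := docs.foldl (fun acc doc =>
    match pvGetTs doc with
    | some s => acc ++ [s]
    | none => acc) []
  if timestamps = [] then (none, none)
  else
    let st := PySem.List.sorted timestamps (fun x => x) false
    (PySem.List.pyGet? st 0, PySem.List.pyGet? st (-1))

-- ===== PORT B =====
def find_date_range_alt (docs : List (List (String × String))) : Option String × Option String :=
  let r := docs.foldl (fun acc doc =>
    match pvGetTs doc with
    | some s =>
      match acc with
      | none => some (s, s)
      | some (lo, hi) => some ((if s < lo then s else lo), (if hi < s then s else hi))
    | none => acc) (none : Option (String × String))
  match r with
  | none => (none, none)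
  | some (lo, hi) => (some lo, some hi)

-- ===== PRECONDITION & SPEC =====
def Spec_find_date_range (docs : List (List (String × String))) (out : Option String × Option String) : Prop := out = find_date_range_alt docs
instance (docs : List (List (String × String))) (out : Option String × Option String) : Decidable (Spec_find_date_range docs out) := by unfold Spec_find_date_range; infer_instance

-- ===== CLAIM (what is proved, stated in full; the proofs are below) =====
def Claim_equal_find_date_range : Prop := ∀ (docs : List (List (String × String))), Dom_find_date_range docs → Spec_find_date_range docs (find_date_range docs)

-- ===== LEMMAS AND PROOFS =====

-- the list of kept timestamps, in doc order
def pvExtract (docs : List (List (String × String))) : List String :=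
  docs.flatMap (fun d => (pvGetTs d).toList)

-- running minimum / maximum folds performed by B
def pvFMin (x : String) (l : List String) : String :=
  l.foldl (fun a s => if s < a then s else a) x
def pvFMax (x : String) (l : List String) : String :=
  l.foldl (fun a s => if a < s then s else a) x

def pvStepB (acc : Option (String × String)) (s : String) : Option (String × String) :=
  match acc with
  | none => some (s, s)
  | some (lo, hi) => some ((if s < lo then s else lo), (if hi < s then s else hi))

theorem pvA_fold (docs : List (List (String × String))) (acc : List String) :
    docs.foldl (fun acc doc =>
      match pvGetTs doc with
      | some s => acc ++ [s]
      | none => acc) acc = acc ++ pvExtract docs := by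
  induction docs generalizing acc with
  | nil => simp [pvExtract]
  | cons d t ih =>
    rw [List.foldl_cons, show pvExtract (d :: t) = (pvGetTs d).toList ++ pvExtract t from rfl]
    cases h : pvGetTs d with
    | none => simpa using ih acc
    | some s => simpa [List.append_assoc] using ih (acc ++ [s])

theorem pvB_fold (docs : List (List (String × String))) (acc : Option (String × String)) :
    docs.foldl (fun acc doc =>
      match pvGetTs doc with
      | some s =>
        match acc with
        | none => some (s, s)
        | some (lo, hi) => some ((if s < lo then s else lo), (if hi < s then s else hi))
      | none => acc) acc = (pvExtract docs).foldl pvStepB acc := by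
  induction docs generalizing acc with
  | nil => simp [pvExtract]
  | cons d t ih =>
    rw [List.foldl_cons,
      show pvExtract (d :: t) = (pvGetTs d).toList ++ pvExtract t from rfl, List.foldl_append]
    cases h : pvGetTs d with
    | none => exact ih acc
    | some s => exact ih (pvStepB acc s)

theorem pvStepB_minmax (l : List String) (lo hi : String) :
    l.foldl pvStepB (some (lo, hi)) = some (pvFMin lo l, pvFMax hi l) := by
  induction l generalizing lo hi with
  | nil => rfl
  | cons s t ih => exact ih _ _

theorem pvFMin_mem : ∀ (l : List String) (x : String), pvFMin x l ∈ x :: l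
  | [], x => by simp [pvFMin]
  | s :: t, x => by
    have h : pvFMin (if s < x then s else x) t ∈ (if s < x then s else x) :: t :=
      pvFMin_mem t _
    show pvFMin (if s < x then s else x) t ∈ x :: s :: t
    rcases List.mem_cons.mp h with h | h
    · rw [h]; split <;> simp
    · exact List.mem_cons_of_mem _ (List.mem_cons_of_mem _ h)

theorem pvFMin_le : ∀ (l : List String) (x y : String), y ∈ x :: l → pvFMin x l ≤ y
  | [], x, y, hy => by
    rcases List.mem_cons.mp hy with h | h
    · rw [h]; exact le_refl _
    · simp at h
  | s :: t, x, y, hy => by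
    show pvFMin (if s < x then s else x) t ≤ y
    have hhead : pvFMin (if s < x then s else x) t ≤ (if s < x then s else x) :=
      pvFMin_le t _ _ (List.mem_cons_self)
    rcases List.mem_cons.mp hy with rfl | hy'
    · refine le_trans hhead ?_
      split_ifs with hc
      · exact le_of_lt hc
      · exact le_refl _
    · rcases List.mem_cons.mp hy' with rfl | hy''
      · refine le_trans hhead ?_
        split_ifs with hc
        · exact le_refl _
        · exact le_of_not_gt hc
      · exact pvFMin_le t _ _ (List.mem_cons_of_mem _ hy'')

theorem pvFMax_mem : ∀ (l : List String) (x : String), pvFMax x l ∈ x :: l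
  | [], x => by simp [pvFMax]
  | s :: t, x => by
    have h : pvFMax (if x < s then s else x) t ∈ (if x < s then s else x) :: t :=
      pvFMax_mem t _
    show pvFMax (if x < s then s else x) t ∈ x :: s :: t
    rcases List.mem_cons.mp h with h | h
    · rw [h]; split <;> simp
    · exact List.mem_cons_of_mem _ (List.mem_cons_of_mem _ h)

theorem pvFMax_ge : ∀ (l : List String) (x y : String), y ∈ x :: l → y ≤ pvFMax x l
  | [], x, y, hy => by
    rcases List.mem_cons.mp hy with h | h
    · rw [h]; exact le_refl _
    · simp at h
  | s :: t, x, y, hy => by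
    show y ≤ pvFMax (if x < s then s else x) t
    have hhead : (if x < s then s else x) ≤ pvFMax (if x < s then s else x) t :=
      pvFMax_ge t _ _ (List.mem_cons_self)
    rcases List.mem_cons.mp hy with rfl | hy'
    · refine le_trans ?_ hhead
      split_ifs with hc
      · exact le_of_lt hc
      · exact le_refl _
    · rcases List.mem_cons.mp hy' with rfl | hy''
      · refine le_trans ?_ hhead
        split_ifs with hc
        · exact le_refl _
        · exact le_of_not_gt hc
      · exact pvFMax_ge t _ _ (List.mem_cons_of_mem _ hy'')

theorem pvPairwise_getLast? {l : List String} {z : String}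
    (hp : l.Pairwise (fun a b => a ≤ b)) (hz : l.getLast? = some z) :
    ∀ y ∈ l, y ≤ z := by
  induction l with
  | nil => simp at hz
  | cons a t ih =>
    intro y hy
    cases t with
    | nil => simp_all
    | cons b u =>
      have hz' : (b :: u).getLast? = some z := by
        simpa [List.getLast?_cons_cons] using hz
      rcases List.mem_cons.mp hy with hy | hy
      · subst hy
        have hzm : z ∈ b :: u := List.mem_of_getLast? hz'
        exact (List.pairwise_cons.mp hp).1 z hzm
      · exact ih (List.pairwise_cons.mp hp).2 hz' y hy

-- ===== VERDICT (by name: the statement is the Claim_ definition above) =====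
theorem find_date_range_spec : Claim_equal_find_date_range := by
  intro docs _
  unfold Spec_find_date_range find_date_range find_date_range_alt
  rw [pvA_fold, pvB_fold]
  rw [List.nil_append]
  cases hts : pvExtract docs with
  | nil => rfl
  | cons x t =>
    rw [show (x :: t).foldl pvStepB none = (t.foldl pvStepB (some (x, x))) from rfl,
      pvStepB_minmax]
    have hne : x :: t ≠ [] := by simp
    have hstne : PySem.List.sorted (x :: t) (fun x => x) false ≠ [] := by
      intro hcon
      have hlen := (PySem.List.sorted_perm (x :: t) (fun x => x) false).length_eq
      rw [hcon] at hlen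
      simp at hlen
    rcases List.exists_cons_of_ne_nil hstne with ⟨m, r, hst⟩
    have hperm : (PySem.List.sorted (x :: t) (fun x => x) false).Perm (x :: t) :=
      PySem.List.sorted_perm _ _ _
    -- head of the sorted list = B's running min
    have hmmem : m ∈ x :: t := hperm.mem_iff.mp (by simp [hst])
    have hmle : ∀ y ∈ x :: t, m ≤ y := by
      intro y hy
      simpa using PySem.List.key_head_sorted_le _ _ hst y hy
    have hmin : m = pvFMin x t :=
      le_antisymm (hmle _ (pvFMin_mem t x)) (pvFMin_le t x m hmmem)
    -- last of the sorted list = B's running max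
    have hp : (PySem.List.sorted (x :: t) (fun x => x) false).Pairwise
        (fun a b => a ≤ b) := by
      simpa using PySem.List.sorted_pairwise (xs := x :: t) (key := fun x => x)
    obtain ⟨z, hz⟩ : ∃ z,
        (PySem.List.sorted (x :: t) (fun x => x) false).getLast? = some z := by
      cases hl : (PySem.List.sorted (x :: t) (fun x => x) false).getLast? with
      | none => exact absurd (List.getLast?_eq_none_iff.mp hl) hstne
      | some z => exact ⟨z, rfl⟩
    have hzmem : z ∈ x :: t := hperm.mem_iff.mp (List.mem_of_getLast? hz)
    have hzge : ∀ y ∈ x :: t, y ≤ z := fun y hy =>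
      pvPairwise_getLast? hp hz y (hperm.mem_iff.mpr hy)
    have hmax : z = pvFMax x t :=
      le_antisymm (pvFMax_ge t x z hzmem) (hzge _ (pvFMax_mem t x))
    show (PySem.List.pyGet? (PySem.List.sorted (x :: t) (fun x => x) false) 0,
        PySem.List.pyGet? (PySem.List.sorted (x :: t) (fun x => x) false) (-1)) =
      (some (pvFMin x t), some (pvFMax x t))
    rw [PySem.List.pyGet?_neg_one, hz, hmax, PySem.List.pyGet?_zero, hst]
    simp [hmin]
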